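-- pv_equiv track=rewrite | github.com/pypi-data/pypi-mirror-97 | packages/bio-hansel/bio_hansel-2.6.1-py2.py3-none-any.whl/bio_hansel/subtyper.py | get_missing_internal_subtypes
-- ===== SOURCE A (Python) =====
-- from typing import Optional, List, Dict, Union, Tuple, Set
--
-- def get_missing_internal_subtypes(st_vals: List[str],
--                                   pos_subtypes_set: Set[str]) -> Set[str]:
--     """Compare nested subtypes from the final subtype call to positive subtypes found
--
--     Args:
--         st_vals: Hierarchical subtype values
--         pos_subtypes_set: Set of positive subtypes
--
--     Returns:
--         Set of missing nested hierarchical subtypes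
--     """
--     out = set()
--     for i in range(len(st_vals)):
--         sub_subtype = '.'.join(st_vals[0: i + 1])
--         if sub_subtype not in pos_subtypes_set:
--             out.add(sub_subtype)
--     return out
-- ===== SOURCE B (Python) =====
-- from typing import Optional, List, Dict, Union, Tuple, Set
--
-- def get_missing_internal_subtypes(st_vals: List[str],
--                                   pos_subtypes_set: Set[str]) -> Set[str]:
--     """Scan once, threading the growing dotted prefix, then one bulk set difference."""
--     prefixes = []
--     acc = None
--     for part in st_vals:
--         acc = part if acc is None else acc + '.' + part
--         prefixes.append(acc)
--     return set(prefixes) - set(pos_subtypes_set)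
-- ===== Notes on version B (the rewrite author's own statement) =====
-- stated objective: alternative
-- what changed: Replaces the index loop that re-slices st_vals[0:i+1] and re-joins it each iteration (with an inline membership filter) by a single scan that threads the growing dotted prefix, followed by one bulk set difference.
import Mathlib
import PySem

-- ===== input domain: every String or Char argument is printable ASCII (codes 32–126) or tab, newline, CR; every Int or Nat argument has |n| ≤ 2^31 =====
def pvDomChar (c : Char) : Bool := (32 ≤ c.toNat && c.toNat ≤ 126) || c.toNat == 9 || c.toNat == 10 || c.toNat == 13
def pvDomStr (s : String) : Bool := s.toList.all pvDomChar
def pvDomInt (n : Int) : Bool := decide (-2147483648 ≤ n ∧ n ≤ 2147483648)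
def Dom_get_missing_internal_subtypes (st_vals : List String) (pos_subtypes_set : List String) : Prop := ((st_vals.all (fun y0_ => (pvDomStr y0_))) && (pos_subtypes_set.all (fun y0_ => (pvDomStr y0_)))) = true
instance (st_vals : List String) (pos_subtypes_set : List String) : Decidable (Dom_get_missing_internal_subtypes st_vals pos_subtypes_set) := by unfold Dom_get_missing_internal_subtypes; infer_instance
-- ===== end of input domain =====

-- B replaces A's per-index re-slice-and-join with a single scan threading the growing
-- dotted prefix, followed by one bulk set difference (objective: alternative decomposition).

-- ===== PORT A =====
def get_missing_internal_subtypes (st_vals : List String) (pos_subtypes_set : List String) : List String :=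
  (PySem.List.pyRange 0 (st_vals.length : Int) 1).foldl
    (fun out i =>
      let sub_subtype := PySem.Str.join "." (PySem.List.slice st_vals (some 0) (some (i + 1)))
      if PySem.Set.contains pos_subtypes_set sub_subtype then out
      else PySem.Set.add out sub_subtype)
    PySem.Set.empty

-- ===== PORT B =====
def get_missing_internal_subtypes_alt (st_vals : List String) (pos_subtypes_set : List String) : List String :=
  let scan := st_vals.foldl
    (fun (st : List String × Option String) part =>
      let acc := match st.2 with
        | none => part
        | some a => a ++ "." ++ part
      (st.1 ++ [acc], some acc)) ([], none)
  PySem.Set.diff (PySem.Set.ofList scan.1) (PySem.Set.ofList pos_subtypes_set)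

-- ===== PRECONDITION & SPEC =====
def Spec_get_missing_internal_subtypes (st_vals : List String) (pos_subtypes_set : List String) (out : List String) : Prop := out = get_missing_internal_subtypes_alt st_vals pos_subtypes_set
instance (st_vals : List String) (pos_subtypes_set : List String) (out : List String) : Decidable (Spec_get_missing_internal_subtypes st_vals pos_subtypes_set out) := by unfold Spec_get_missing_internal_subtypes; infer_instance

-- ===== CLAIM (what is proved, stated in full; the proofs are below) =====
def Claim_equal_get_missing_internal_subtypes : Prop := ∀ (st_vals : List String) (pos_subtypes_set : List String), Dom_get_missing_internal_subtypes st_vals pos_subtypes_set → Spec_get_missing_internal_subtypes st_vals pos_subtypes_set (get_missing_internal_subtypes st_vals pos_subtypes_set)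

-- ===== LEMMAS AND PROOFS =====

/-- The `k`-th dotted prefix of `l` (the value A joins at index `k`). -/
def pvPref (l : List String) (k : Nat) : String := PySem.Str.join "." (l.take (k + 1))

/-- The list of accumulated prefixes B's scan appends after seeing `l`, starting from `a`. -/
def pvScan (a : String) : List String → List String
  | [] => []
  | x :: t => (a ++ "." ++ x) :: pvScan (a ++ "." ++ x) t

/-- The last accumulator of B's scan. -/
def pvLast (a : String) : List String → String
  | [] => a
  | x :: t => pvLast (a ++ "." ++ x) t

theorem pvChars_join_snoc (sep : List Char) (ps : List (List Char)) (x : List Char)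
    (h : ps ≠ []) :
    PySem.Chars.join sep (ps ++ [x]) = PySem.Chars.join sep ps ++ sep ++ x := by
  induction ps with
  | nil => simp at h
  | cons p t ih =>
    cases t with
    | nil =>
      simp only [List.nil_append, List.cons_append]
      rw [PySem.Chars.join_cons_cons, PySem.Chars.join_singleton, PySem.Chars.join_singleton]
    | cons q r =>
      simp only [List.cons_append]
      rw [PySem.Chars.join_cons_cons, PySem.Chars.join_cons_cons (rest := r)]
      rw [show (q :: r) ++ [x] = q :: (r ++ [x]) from rfl] at *
      rw [ih (by simp)]
      simp [List.append_assoc]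

theorem pvStr_join_snoc (ps : List String) (x : String) (h : ps ≠ []) :
    PySem.Str.join "." (ps ++ [x]) = PySem.Str.join "." ps ++ "." ++ x := by
  apply String.toList_inj.mp
  simp only [PySem.Str.toList_join, List.map_append, List.map_cons, List.map_nil,
    String.toList_append]
  rw [pvChars_join_snoc _ _ _ (by simpa using h)]

theorem pvStr_join_singleton (x : String) : PySem.Str.join "." [x] = x := by
  apply String.toList_inj.mp
  simp [PySem.Str.toList_join, PySem.Chars.join_singleton]

theorem pvFold_some (l : List String) : ∀ (out : List String) (a : String),
    l.foldl
      (fun (st : List String × Option String) part =>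
        let acc := match st.2 with
          | none => part
          | some b => b ++ "." ++ part
        (st.1 ++ [acc], some acc)) (out, some a)
      = (out ++ pvScan a l, some (pvLast a l)) := by
  induction l with
  | nil => intro out a; simp [pvScan, pvLast]
  | cons x t ih =>
    intro out a
    simp only [List.foldl_cons]
    rw [ih]
    simp [pvScan, pvLast, List.append_assoc]

theorem pvScan_take (l : List String) : ∀ (pre : List String), pre ≠ [] →
    pvScan (PySem.Str.join "." pre) l
      = (List.range l.length).map (fun k => PySem.Str.join "." (pre ++ l.take (k + 1))) := by
  induction l with
  | nil => intro pre _; simp [pvScan]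
  | cons x t ih =>
    intro pre hpre
    have hsnoc := pvStr_join_snoc pre x hpre
    simp only [pvScan]
    rw [← hsnoc, ih (pre ++ [x]) (by simp)]
    simp only [List.length_cons, List.range_succ_eq_map, List.map_cons, List.map_map]
    congr 1
    apply List.map_congr_left
    intro k _
    simp [List.append_assoc, List.take_succ_cons]

theorem pvAlt_prefixes (l : List String) :
    (l.foldl
      (fun (st : List String × Option String) part =>
        let acc := match st.2 with
          | none => part
          | some a => a ++ "." ++ part
        (st.1 ++ [acc], some acc)) ([], none)).1
      = (List.range l.length).map (pvPref l) := by
  cases l with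
  | nil => simp
  | cons x t =>
    change (t.foldl _ (([x] : List String), some x)).1 = _
    rw [pvFold_some]
    have hsc : pvScan x t = pvScan (PySem.Str.join "." [x]) t := by
      rw [pvStr_join_singleton]
    simp only [hsc]
    rw [pvScan_take t [x] (by simp)]
    simp only [List.length_cons, List.range_succ_eq_map, List.map_cons, List.map_map]
    simp [pvPref, pvStr_join_singleton]

theorem pvA_filter (st_vals pos : List String) :
    get_missing_internal_subtypes st_vals pos
      = (((List.range st_vals.length).map (pvPref st_vals)).filter
          (fun s => !PySem.Set.contains pos s)).foldl PySem.Set.add PySem.Set.empty := by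
  unfold get_missing_internal_subtypes
  rw [PySem.List.pyRange_one]
  simp only [Int.sub_zero, Int.toNat_natCast]
  rw [List.foldl_map]
  have hbody : (fun (out : List String) (k : Nat) =>
      let sub_subtype := PySem.Str.join "."
        (PySem.List.slice st_vals (some 0) (some ((0 : Int) + (k : Int) + 1)))
      if PySem.Set.contains pos sub_subtype then out
      else PySem.Set.add out sub_subtype)
      = (fun (out : List String) (k : Nat) =>
        if (!PySem.Set.contains pos (pvPref st_vals k)) then
          PySem.Set.add out (pvPref st_vals k) else out) := by
    funext out k
    have hc : (0 : Int) + (k : Int) + 1 = ((k + 1 : Nat) : Int) := by push_cast; ring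
    simp only [hc, PySem.List.slice_zero_start, PySem.List.slice_to_natCast, pvPref]
    cases PySem.Set.contains pos (PySem.Str.join "." (st_vals.take (k + 1))) <;> simp
  rw [hbody, PySem.List.foldl_if_eq_foldl_filter, List.filter_map, List.foldl_map]
  rfl

theorem pvPref_len_lt (l : List String) (k : Nat) (h : k + 1 < l.length) :
    (pvPref l k).toList.length < (pvPref l (k + 1)).toList.length := by
  unfold pvPref
  have htake : l.take (k + 1 + 1) = l.take (k + 1) ++ [l[k + 1]'h] := by
    rw [List.take_add_one, List.getElem?_eq_getElem h]
    rfl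
  rw [htake, pvStr_join_snoc _ _ (by
    intro hnil
    rcases List.take_eq_nil_iff.mp hnil with h1 | h1
    · omega
    · subst h1; simp at h)]
  simp only [String.toList_append, List.length_append]
  have : ("." : String).toList.length = 1 := rfl
  omega

theorem pvPref_nodup (l : List String) : ((List.range l.length).map (pvPref l)).Nodup := by
  have mono : ∀ j k : Nat, k < j → j < l.length →
      (pvPref l k).toList.length < (pvPref l j).toList.length := by
    intro j
    induction j with
    | zero => intro k hk _; exact absurd hk (Nat.not_lt_zero k)
    | succ j ih =>
      intro k hk hj
      rcases Nat.lt_succ_iff_lt_or_eq.mp hk with h | h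
      · exact lt_trans (ih k h (by omega)) (pvPref_len_lt l j (by omega))
      · subst h; exact pvPref_len_lt l k (by omega)
  refine List.Nodup.map_on ?_ (List.nodup_range)
  intro a ha b hb hfe
  simp only [List.mem_range] at ha hb
  by_contra hne
  rcases lt_or_gt_of_ne hne with hlt | hlt
  · exact absurd (congrArg (fun s => s.toList.length) hfe) (Nat.ne_of_lt (mono b a hlt hb))
  · exact absurd (congrArg (fun s => s.toList.length) hfe) (Nat.ne_of_gt (mono a b hlt ha))

theorem pvContains_ofList (pos : List String) (x : String) :
    PySem.Set.contains (PySem.Set.ofList pos) x = PySem.Set.contains pos x := by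
  rw [Bool.eq_iff_iff]
  simp [PySem.Set.mem_ofList]

-- ===== VERDICT (by name: the statement is the Claim_ definition above) =====
theorem get_missing_internal_subtypes_spec : Claim_equal_get_missing_internal_subtypes := by
  intro st_vals pos _
  unfold Spec_get_missing_internal_subtypes
  rw [pvA_filter]
  unfold get_missing_internal_subtypes_alt
  simp only []
  rw [pvAlt_prefixes]
  have hnd := pvPref_nodup st_vals
  have h1 : (((List.range st_vals.length).map (pvPref st_vals)).filter
        (fun s => !PySem.Set.contains pos s)).foldl PySem.Set.add PySem.Set.empty
      = ((List.range st_vals.length).map (pvPref st_vals)).filter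
        (fun s => !PySem.Set.contains pos s) := by
    simp only [PySem.Set.empty]
    rw [← PySem.Set.ofList_eq_foldl]
    exact PySem.Set.ofList_eq_self_of_nodup _ (hnd.filter _)
  rw [h1, PySem.Set.ofList_eq_self_of_nodup _ hnd]
  simp only [PySem.Set.diff]
  apply List.filter_congr
  intro x _
  rw [show (PySem.Set.ofList pos).contains x = PySem.Set.contains (PySem.Set.ofList pos) x
      from rfl, pvContains_ofList]
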